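-- pv_equiv track=rewrite | github.com/Oichkatzelesfrettschen/open_gororoba | src/scripts/analysis/normalize_narrative_overlays.py | _clean_entry_body
-- ===== SOURCE A (Python) =====
-- def _clean_entry_body(text: str) -> str:
--     lines = text.splitlines()
--     while lines and not lines[0].strip():
--         lines.pop(0)
--     while lines and lines[0].strip() == "---":
--         lines.pop(0)
--         while lines and not lines[0].strip():
--             lines.pop(0)
--
--     out: list[str] = []
--     for line in lines:
--         if line.strip() == "---":
--             continue
--         out.append(line)
--
--     while out and not out[-1].strip():
--         out.pop()
--     return "\n".join(out).strip()
-- ===== SOURCE B (Python) =====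
-- def _clean_entry_body(text: str) -> str:
--     out = [line for line in text.splitlines() if line.strip() != "---"]
--     return "\n".join(out).strip()
-- ===== Notes on version B (the rewrite author's own statement) =====
-- stated objective: simpler
-- what changed: Replaced A's three destructive pop-based while-loop trim phases (leading blanks, leading separator groups with nested blank trim, trailing blanks) plus a filter loop by a single filter of separator lines and one terminal strip, which subsumes all three trim phases.
import Mathlib
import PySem

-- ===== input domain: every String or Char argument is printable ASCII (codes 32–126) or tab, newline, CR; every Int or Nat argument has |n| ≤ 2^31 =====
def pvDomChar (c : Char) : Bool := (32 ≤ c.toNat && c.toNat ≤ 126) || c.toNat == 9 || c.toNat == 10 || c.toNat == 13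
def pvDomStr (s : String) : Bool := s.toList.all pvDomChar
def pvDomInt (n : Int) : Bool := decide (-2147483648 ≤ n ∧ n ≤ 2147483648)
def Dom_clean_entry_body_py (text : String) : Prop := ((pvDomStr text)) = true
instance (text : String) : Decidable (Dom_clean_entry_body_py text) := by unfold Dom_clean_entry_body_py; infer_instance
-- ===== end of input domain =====

-- B replaces A's three pop-based trim loops by one '---' filter plus a final strip (simpler, same result).


-- ===== PORT A =====
-- while lines and not lines[0].strip(): lines.pop(0)
def pvDropBlanks : List String → List String
  | [] => []
  | l :: ls => if PySem.Str.strip l = "" then pvDropBlanks ls else l :: ls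

theorem pvDropBlanks_length_le (ls : List String) : (pvDropBlanks ls).length ≤ ls.length := by
  induction ls with
  | nil => simp [pvDropBlanks]
  | cons l ls ih =>
    simp only [pvDropBlanks]
    split
    · exact Nat.le_succ_of_le ih
    · simp

-- while lines and lines[0].strip() == "---": pop(0); then the nested blank-trim while
def pvDropSeps : List String → List String
  | [] => []
  | l :: ls =>
    if PySem.Str.strip l = "---" then pvDropSeps (pvDropBlanks ls) else l :: ls
termination_by ls => ls.length
decreasing_by
  simp only [List.length_cons]
  exact Nat.lt_succ_of_le (pvDropBlanks_length_le ls)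

-- while out and not out[-1].strip(): out.pop()
def pvDropTrailing (out : List String) : List String :=
  match h : out.getLast? with
  | none => out
  | some l => if PySem.Str.strip l = "" then pvDropTrailing out.dropLast else out
termination_by out.length
decreasing_by
  have hne : out ≠ [] := by
    intro hnil; rw [hnil] at h; simp at h
  have hpos : 0 < out.length := List.length_pos_of_ne_nil hne
  simp only [List.length_dropLast]
  omega

def clean_entry_body_py (text : String) : String :=
  let lines0 := PySem.Str.splitlines text
  let lines1 := pvDropBlanks lines0
  let lines2 := pvDropSeps lines1
  let out := lines2.foldl
    (fun out line => if PySem.Str.strip line = "---" then out else out ++ [line]) []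
  let out2 := pvDropTrailing out
  PySem.Str.strip (PySem.Str.join "\n" out2)

-- ===== PORT B =====
def clean_entry_body_py_alt (text : String) : String :=
  let out := (PySem.Str.splitlines text).filter (fun line => PySem.Str.strip line != "---")
  PySem.Str.strip (PySem.Str.join "\n" out)

-- ===== PRECONDITION & SPEC =====
def Spec_clean_entry_body_py (text : String) (out : String) : Prop := out = clean_entry_body_py_alt text
instance (text : String) (out : String) : Decidable (Spec_clean_entry_body_py text out) := by unfold Spec_clean_entry_body_py; infer_instance

-- ===== CLAIM (what is proved, stated in full; the proofs are below) =====
def Claim_equal_clean_entry_body_py : Prop := ∀ (text : String), Dom_clean_entry_body_py text → Spec_clean_entry_body_py text (clean_entry_body_py text)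

-- ===== LEMMAS AND PROOFS =====

-- all-whitespace append facts on the char level
theorem pv_lstrip_ws_append (w s : List Char) (hw : ∀ c ∈ w, PySem.Chars.isspace c = true) :
    PySem.Chars.lstrip (w ++ s) = PySem.Chars.lstrip s := by
  simp [PySem.Chars.lstrip, List.dropWhile_append, List.dropWhile_eq_nil_iff.mpr hw]

theorem pv_rstrip_append_ws (s w : List Char) (hw : ∀ c ∈ w, PySem.Chars.isspace c = true) :
    PySem.Chars.rstrip (s ++ w) = PySem.Chars.rstrip s := by
  have hw' : ∀ c ∈ w.reverse, PySem.Chars.isspace c = true := by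
    intro c hc; exact hw c (List.mem_reverse.mp hc)
  simp [PySem.Chars.rstrip, List.dropWhile_append, List.dropWhile_eq_nil_iff.mpr hw']

theorem pv_strip_ws_append (w s : List Char) (hw : ∀ c ∈ w, PySem.Chars.isspace c = true) :
    PySem.Chars.strip (w ++ s) = PySem.Chars.strip s := by
  simp [PySem.Chars.strip, pv_lstrip_ws_append w s hw]

theorem pv_strip_append_ws (s w : List Char) (hw : ∀ c ∈ w, PySem.Chars.isspace c = true) :
    PySem.Chars.strip (s ++ w) = PySem.Chars.strip s := by
  simp only [PySem.Chars.strip, PySem.Chars.lstrip, List.dropWhile_append]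
  split
  · next h =>
    rw [List.isEmpty_iff] at h
    rw [h, List.dropWhile_eq_nil_iff.mpr hw]
  · exact pv_rstrip_append_ws _ w hw

theorem pv_blank_all_ws (cs : List Char) (h : PySem.Chars.strip cs = []) :
    ∀ c ∈ cs, PySem.Chars.isspace c = true := by
  have h1 : List.dropWhile PySem.Chars.isspace (List.dropWhile PySem.Chars.isspace cs).reverse = [] := by
    simpa [PySem.Chars.strip, PySem.Chars.lstrip, PySem.Chars.rstrip] using h
  have h2 : ∀ c ∈ (List.dropWhile PySem.Chars.isspace cs).reverse, PySem.Chars.isspace c = true :=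
    List.dropWhile_eq_nil_iff.mp h1
  intro c hc
  rw [← List.takeWhile_append_dropWhile (p := PySem.Chars.isspace) (l := cs)] at hc
  rcases List.mem_append.mp hc with h | h
  · exact List.mem_takeWhile_imp h
  · exact h2 c (List.mem_reverse.mpr h)

-- the result shape both programs end with, on the string level
def pvJs (xs : List String) : String := PySem.Str.strip (PySem.Str.join "\n" xs)

theorem pvJs_chars (xs : List String) :
    pvJs xs = String.ofList (PySem.Chars.strip (PySem.Chars.join ['\n'] (xs.map String.toList))) := by
  simp [pvJs, PySem.Str.strip, PySem.Str.join, String.toList_ofList]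

theorem pv_blank_toList {b : String} (hb : PySem.Str.strip b = "") :
    ∀ c ∈ b.toList, PySem.Chars.isspace c = true := by
  apply pv_blank_all_ws
  have := congrArg String.toList hb
  simpa [PySem.Str.toList_strip] using this

theorem pvJs_cons_blank (b : String) (xs : List String) (hb : PySem.Str.strip b = "") :
    pvJs (b :: xs) = pvJs xs := by
  rw [pvJs_chars, pvJs_chars]
  congr 1
  cases xs with
  | nil =>
    simp only [List.map_cons, List.map_nil, PySem.Chars.join_singleton, PySem.Chars.join_nil]
    have := congrArg String.toList hb
    simpa [PySem.Str.toList_strip] using this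
  | cons y r =>
    simp only [List.map_cons, PySem.Chars.join_cons_cons]
    exact pv_strip_ws_append (b.toList ++ ['\n']) _ (by
      intro c hc
      rcases List.mem_append.mp hc with h | h
      · exact pv_blank_toList hb c h
      · simp at h; subst h; decide)

theorem pv_join_snoc (sep : List Char) (xs : List (List Char)) (b : List Char) (hne : xs ≠ []) :
    PySem.Chars.join sep (xs ++ [b]) = PySem.Chars.join sep xs ++ sep ++ b := by
  induction xs with
  | nil => exact absurd rfl hne
  | cons x r ih =>
    cases r with
    | nil => simp [PySem.Chars.join_cons_cons, PySem.Chars.join_singleton]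
    | cons y t =>
      have := ih (by simp)
      simp only [List.cons_append, PySem.Chars.join_cons_cons] at *
      rw [this]
      simp [List.append_assoc]

theorem pvJs_snoc_blank (xs : List String) (b : String) (hb : PySem.Str.strip b = "") :
    pvJs (xs ++ [b]) = pvJs xs := by
  cases xs with
  | nil =>
    rw [pvJs_chars, pvJs_chars]
    congr 1
    simp only [List.nil_append, List.map_cons, List.map_nil, PySem.Chars.join_singleton,
      PySem.Chars.join_nil]
    have := congrArg String.toList hb
    simpa [PySem.Str.toList_strip] using this
  | cons x r =>
    rw [pvJs_chars, pvJs_chars]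
    congr 1
    simp only [List.map_append, List.map_cons, List.map_nil]
    rw [pv_join_snoc ['\n'] (x.toList :: List.map String.toList r) b.toList (by simp),
      List.append_assoc]
    exact pv_strip_append_ws _ (['\n'] ++ b.toList) (by
      intro c hc
      rcases List.mem_append.mp hc with h | h
      · simp at h; subst h; decide
      · exact pv_blank_toList hb c h)

-- the keep-predicate of the filter
def pvKeep (l : String) : Bool := PySem.Str.strip l != "---"

theorem pvJs_filter_dropBlanks (ls : List String) :
    pvJs (List.filter pvKeep (pvDropBlanks ls)) = pvJs (List.filter pvKeep ls) := by
  induction ls with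
  | nil => rfl
  | cons l ls ih =>
    simp only [pvDropBlanks]
    split
    · next h =>
      have hk : pvKeep l = true := by
        simp only [pvKeep, h]; decide
      rw [List.filter_cons_of_pos hk, pvJs_cons_blank l _ h, ih]
    · rfl

theorem pvJs_filter_dropSeps (ls : List String) :
    pvJs (List.filter pvKeep (pvDropSeps ls)) = pvJs (List.filter pvKeep ls) := by
  induction ls using pvDropSeps.induct with
  | case1 => simp [pvDropSeps]
  | case2 l ls h ih =>
    simp only [pvDropSeps, h, if_pos]
    have hk : pvKeep l = false := by
      simp [pvKeep, h]
    rw [List.filter_cons_of_neg (by simp [hk]), ih, pvJs_filter_dropBlanks]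
  | case3 l ls h =>
    simp [pvDropSeps, h]

theorem pvJs_dropTrailing (out : List String) :
    pvJs (pvDropTrailing out) = pvJs out := by
  induction out using pvDropTrailing.induct with
  | case1 out h =>
    rw [pvDropTrailing.eq_def, h]
  | case2 out l h hb ih =>
    rw [pvDropTrailing.eq_def, h]
    simp only [hb, if_pos]
    rw [ih]
    have hne : out ≠ [] := by intro hnil; rw [hnil] at h; simp at h
    have hsplit : out.dropLast ++ [l] = out := by
      have := List.dropLast_append_getLast hne
      rwa [List.getLast_eq_iff_getLast?_eq_some hne |>.mpr h] at this
    conv_rhs => rw [← hsplit]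
    rw [pvJs_snoc_blank _ _ hb]
  | case3 out l h hb =>
    rw [pvDropTrailing.eq_def, h]
    simp [hb]

theorem pv_foldl_filter (ls : List String) :
    ls.foldl (fun out line => if PySem.Str.strip line = "---" then out else out ++ [line]) []
      = List.filter pvKeep ls := by
  have hstep : (fun (out : List String) (line : String) =>
      if PySem.Str.strip line = "---" then out else out ++ [line])
      = (fun out line => if pvKeep line = true then out ++ [id line] else out) := by
    funext o l
    by_cases h : PySem.Str.strip l = "---" <;> simp [pvKeep, h]
  rw [hstep, PySem.List.foldl_append_if pvKeep id ls []]
  simp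

-- ===== VERDICT (by name: the statement is the Claim_ definition above) =====
theorem clean_entry_body_py_spec : Claim_equal_clean_entry_body_py := by
  intro text _
  unfold Spec_clean_entry_body_py
  show clean_entry_body_py text = clean_entry_body_py_alt text
  simp only [clean_entry_body_py, clean_entry_body_py_alt]
  rw [pv_foldl_filter]
  have h1 := pvJs_dropTrailing (List.filter pvKeep (pvDropSeps (pvDropBlanks (PySem.Str.splitlines text))))
  have h2 := pvJs_filter_dropSeps (pvDropBlanks (PySem.Str.splitlines text))
  have h3 := pvJs_filter_dropBlanks (PySem.Str.splitlines text)
  simpa [pvJs, pvKeep] using h1.trans (h2.trans h3)
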